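-- pv_equiv track=rewrite | github.com/elumobility/ocpi-python | scripts/ocpi_parser.py | _split_table_rows
-- ===== SOURCE A (Python) =====
-- def _split_table_rows(table_content: str) -> list[str]:
--     """Split table content into rows, handling multi-line cells."""
--     rows = []
--     current_row = []
--     lines = table_content.strip().split("\n")
--
--     for line in lines:
--         if line.startswith("|") and not line.startswith("|==="):
--             # Count pipes to detect if this is a new row
--             pipe_count = line.count("|")
--             if pipe_count >= 4 and current_row:
--                 # This looks like a new row, save the previous one
--                 rows.append("\n".join(current_row))
--                 current_row = [line]
--             else:
--                 current_row.append(line)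
--         elif current_row:
--             current_row.append(line)
--
--     if current_row:
--         rows.append("\n".join(current_row))
--
--     return rows
-- ===== SOURCE B (Python) =====
-- def _split_table_rows(table_content: str) -> list[str]:
--     """Split table content into rows, handling multi-line cells."""
--
--     def is_opener(line):
--         return line.startswith("|") and not line.startswith("|===")
--
--     def is_boundary(line):
--         return is_opener(line) and line.count("|") >= 4
--
--     lines = table_content.strip().split("\n")
--     i = 0
--     while i < len(lines) and not is_opener(lines[i]):
--         i += 1
--     rows = []
--     while i < len(lines):
--         j = i + 1
--         while j < len(lines) and not is_boundary(lines[j]):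
--             j += 1
--         rows.append("\n".join(lines[i:j]))
--         i = j
--     return rows
-- ===== Notes on version B (the rewrite author's own statement) =====
-- stated objective: alternative
-- what changed: Replaces A's single-pass accumulator state machine (rows/current_row) with a segment decomposition: skip lines before the first opener, then repeatedly scan forward to the next boundary line and emit each segment as one joined row.
import Mathlib
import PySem

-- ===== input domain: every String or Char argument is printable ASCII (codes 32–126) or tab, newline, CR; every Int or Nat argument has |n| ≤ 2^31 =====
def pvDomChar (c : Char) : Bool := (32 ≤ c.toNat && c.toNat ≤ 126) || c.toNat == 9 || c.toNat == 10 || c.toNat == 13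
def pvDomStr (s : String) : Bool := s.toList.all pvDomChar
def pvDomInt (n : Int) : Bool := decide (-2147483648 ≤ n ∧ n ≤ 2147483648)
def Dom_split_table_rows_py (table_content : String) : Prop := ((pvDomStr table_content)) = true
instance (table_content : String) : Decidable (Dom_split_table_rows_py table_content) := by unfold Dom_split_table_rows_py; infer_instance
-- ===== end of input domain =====

-- B replaces A's accumulator state machine with a two-phase segment decomposition
-- (skip to the first opener, then cut at boundary lines); objective: alternative, same cost.

-- ===== PORT A =====
-- state: (rows, current_row); one fold over the lines, exactly A's branches
def pvStepA (st : List String × List String) (line : String) : List String × List String :=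
  if PySem.Str.startswith line "|" && !PySem.Str.startswith line "|===" then
    if decide (4 ≤ PySem.Str.count line "|") && !st.2.isEmpty then
      (st.1 ++ [PySem.Str.join "\n" st.2], [line])
    else
      (st.1, st.2 ++ [line])
  else if !st.2.isEmpty then
    (st.1, st.2 ++ [line])
  else
    st

def split_table_rows_py (table_content : String) : List String :=
  let lines := (PySem.Str.split? (PySem.Str.strip table_content) "\n").getD []
  let st := lines.foldl pvStepA ([], [])
  if !st.2.isEmpty then st.1 ++ [PySem.Str.join "\n" st.2] else st.1

-- ===== PORT B =====
def pvIsOpen (line : String) : Bool :=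
  PySem.Str.startswith line "|" && !PySem.Str.startswith line "|==="

def pvIsBound (line : String) : Bool :=
  pvIsOpen line && decide (4 ≤ PySem.Str.count line "|")

-- one row per segment: the opener line plus everything up to the next boundary line
def pvSegs : List String → List String
  | [] => []
  | l :: rest =>
      PySem.Str.join "\n" (l :: rest.takeWhile (fun x => !pvIsBound x)) ::
        pvSegs (rest.dropWhile (fun x => !pvIsBound x))
termination_by ls => ls.length
decreasing_by
  exact Nat.lt_succ_of_le (List.length_dropWhile_le _ _)

def split_table_rows_py_alt (table_content : String) : List String :=
  pvSegs (((PySem.Str.split? (PySem.Str.strip table_content) "\n").getD []).dropWhile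
    (fun l => !pvIsOpen l))

-- ===== PRECONDITION & SPEC =====
def Spec_split_table_rows_py (table_content : String) (out : List String) : Prop := out = split_table_rows_py_alt table_content
instance (table_content : String) (out : List String) : Decidable (Spec_split_table_rows_py table_content out) := by unfold Spec_split_table_rows_py; infer_instance

-- ===== CLAIM (what is proved, stated in full; the proofs are below) =====
def Claim_equal_split_table_rows_py : Prop := ∀ (table_content : String), Dom_split_table_rows_py table_content → Spec_split_table_rows_py table_content (split_table_rows_py table_content)

-- ===== LEMMAS AND PROOFS =====

def pvFinish (st : List String × List String) : List String :=
  if !st.2.isEmpty then st.1 ++ [PySem.Str.join "\n" st.2] else st.1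

theorem pvSegs_nil : pvSegs [] = [] := by rw [pvSegs]

theorem pvSegs_cons (l : String) (rest : List String) :
    pvSegs (l :: rest)
      = PySem.Str.join "\n" (l :: rest.takeWhile (fun x => !pvIsBound x)) ::
          pvSegs (rest.dropWhile (fun x => !pvIsBound x)) := by
  rw [pvSegs]

-- with an empty current row, lines before the first opener are skipped
theorem pvSkip (lines : List String) (rows : List String) :
    List.foldl pvStepA (rows, []) lines
      = List.foldl pvStepA (rows, []) (lines.dropWhile (fun l => !pvIsOpen l)) := by
  induction lines with
  | nil => rfl
  | cons l rest ih =>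
      by_cases ho : pvIsOpen l = true
      · simp [ho]
      · have hoF : pvIsOpen l = false := by simpa using ho
        have hstep : pvStepA (rows, []) l = (rows, []) := by
          by_cases h1 : PySem.Chars.startswith l.toList ['|'] = true
          · have h2 : PySem.Chars.startswith l.toList ['|', '=', '=', '='] = true := by
              have := hoF; simp [pvIsOpen, h1] at this; simpa using this
            simp [pvStepA, h1, h2]
          · simp [pvStepA, (by simpa using h1 : PySem.Chars.startswith l.toList ['|'] = false)]
        rw [List.foldl_cons, hstep, List.dropWhile_cons_of_pos (by simp [hoF]), ih]

-- main invariant: with a nonempty current row, finishing the fold yields the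
-- current segment followed by the segments of the remaining lines
theorem pvMain (lines : List String) (rows cur : List String) (hc : cur ≠ []) :
    pvFinish (List.foldl pvStepA (rows, cur) lines)
      = rows ++ PySem.Str.join "\n" (cur ++ lines.takeWhile (fun x => !pvIsBound x)) ::
          pvSegs (lines.dropWhile (fun x => !pvIsBound x)) := by
  induction lines generalizing rows cur with
  | nil => simp [pvFinish, hc, pvSegs_nil]
  | cons l rest ih =>
      by_cases hb : pvIsBound l = true
      · simp [pvIsBound, pvIsOpen] at hb
        obtain ⟨⟨h1, h2⟩, h3⟩ := hb
        have hstep : pvStepA (rows, cur) l = (rows ++ [PySem.Str.join "\n" cur], [l]) := by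
          simp [pvStepA, h1, h2, h3, hc]
        rw [List.foldl_cons, hstep, ih _ _ (by simp),
            List.takeWhile_cons_of_neg (by simp [pvIsBound, pvIsOpen, h1, h2, h3]),
            List.dropWhile_cons_of_neg (by simp [pvIsBound, pvIsOpen, h1, h2, h3]),
            pvSegs_cons]
        simp
      · have hstep : pvStepA (rows, cur) l = (rows, cur ++ [l]) := by
          by_cases ho : pvIsOpen l = true
          · have h3 : ¬ (4 ≤ PySem.Chars.count l.toList ['|']) := by
              simp [pvIsBound, ho] at hb; simpa using hb
            have ho' : PySem.Chars.startswith l.toList ['|'] = true ∧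
                PySem.Chars.startswith l.toList ['|', '=', '=', '='] = false := by
              simpa [pvIsOpen] using ho
            simp [pvStepA, ho'.1, ho'.2, h3]
          · have hoF : pvIsOpen l = false := by simpa using ho
            by_cases h1 : PySem.Chars.startswith l.toList ['|'] = true
            · have h2 : PySem.Chars.startswith l.toList ['|', '=', '=', '='] = true := by
                have := hoF; simp [pvIsOpen, h1] at this; simpa using this
              simp [pvStepA, h1, h2, hc]
            · simp [pvStepA, (by simpa using h1 : PySem.Chars.startswith l.toList ['|'] = false), hc]
        rw [List.foldl_cons, hstep, ih _ _ (by simp),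
            List.takeWhile_cons_of_pos (by simp [hb]),
            List.dropWhile_cons_of_pos (by simp [hb])]
        simp

-- ===== VERDICT (by name: the statement is the Claim_ definition above) =====
theorem split_table_rows_py_spec : Claim_equal_split_table_rows_py := by
  intro tc _
  unfold Spec_split_table_rows_py split_table_rows_py split_table_rows_py_alt
  set lines := (PySem.Str.split? (PySem.Str.strip tc) "\n").getD [] with hl
  show pvFinish (List.foldl pvStepA ([], []) lines) = _
  rw [pvSkip]
  cases hd : lines.dropWhile (fun l => !pvIsOpen l) with
  | nil => simp [pvFinish, pvSegs_nil]
  | cons l rest =>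
      have ho : pvIsOpen l = true := by
        have := List.head_dropWhile_not (fun l => !pvIsOpen l) (l := lines) (by simp [hd])
        simpa [hd] using this
      have ho' : PySem.Chars.startswith l.toList ['|'] = true ∧
          PySem.Chars.startswith l.toList ['|', '=', '=', '='] = false := by
        simpa [pvIsOpen] using ho
      have hstep : pvStepA (([], []) : List String × List String) l = ([], [l]) := by
        simp [pvStepA, ho'.1, ho'.2]
      rw [List.foldl_cons, hstep, pvMain _ _ _ (by simp), pvSegs_cons]
      simp
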